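-- pv_equiv track=rewrite | github.com/steveopen1/ApiRed | core/collectors/auto_auth.py | _build_body_template
-- ===== SOURCE A (Python) =====
-- from typing import Dict, List, Optional, Set, Tuple, Any
--
-- def _build_body_template(param_names: List[str]) -> Dict[str, Any]:
--     """构建请求体模板"""
--     template = {}
--
--     for name in param_names:
--         name_lower = name.lower()
--         if 'password' in name_lower or 'pwd' in name_lower:
--             template[name] = '123456'
--         elif 'username' in name_lower or 'account' in name_lower:
--             template[name] = 'admin'
--         elif 'mobile' in name_lower or 'phone' in name_lower:
--             template[name] = '13800138000'
--         elif 'token' in name_lower: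
--             template[name] = ''
--         else:
--             template[name] = 'test'
--
--     return template
-- ===== SOURCE B (Python) =====
-- from typing import Dict, List, Any
--
-- _RULES = [
--     (('password', 'pwd'), '123456'),
--     (('username', 'account'), 'admin'),
--     (('mobile', 'phone'), '13800138000'),
--     (('token',), ''),
-- ]
--
-- def _build_body_template(param_names: List[str]) -> Dict[str, Any]:
--     """构建请求体模板 (staged overwrite passes)"""
--     template = {name: 'test' for name in param_names}
--     for keywords, value in reversed(_RULES):
--         for name in template:
--             low = name.lower()
--             if any(kw in low for kw in keywords):
--                 template[name] = value
--     return template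
-- ===== Notes on version B (the rewrite author's own statement) =====
-- stated objective: alternative
-- what changed: Instead of classifying each name once via a first-match chain, B initializes every name to 'test' and then makes one overwrite pass per rule in reverse priority order (rules outer loop, names inner loop), so higher-priority rules overwrite lower ones.
import Mathlib
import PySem

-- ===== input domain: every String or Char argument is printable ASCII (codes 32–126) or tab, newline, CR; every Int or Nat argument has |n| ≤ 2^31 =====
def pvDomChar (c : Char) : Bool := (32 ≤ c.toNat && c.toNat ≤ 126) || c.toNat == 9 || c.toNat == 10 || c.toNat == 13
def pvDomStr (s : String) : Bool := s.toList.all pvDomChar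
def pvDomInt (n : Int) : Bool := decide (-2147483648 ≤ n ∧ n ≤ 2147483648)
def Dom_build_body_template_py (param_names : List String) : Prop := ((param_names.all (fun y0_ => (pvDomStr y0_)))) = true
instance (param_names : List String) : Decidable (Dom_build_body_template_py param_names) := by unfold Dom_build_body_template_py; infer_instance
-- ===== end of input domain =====

-- B replaces A's per-name if/elif chain by staged passes: every name starts at 'test', then each rule (lowest priority first) overwrites its matching keys (alternative decomposition; same cost). A mutates nothing; return value only.


-- ===== PORT A =====
-- value assigned for one parameter name: the if/elif chain of A
def pvValA (name : String) : String :=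
  let name_lower := PySem.Str.lower name
  if PySem.Str.isIn "password" name_lower || PySem.Str.isIn "pwd" name_lower then "123456"
  else if PySem.Str.isIn "username" name_lower || PySem.Str.isIn "account" name_lower then "admin"
  else if PySem.Str.isIn "mobile" name_lower || PySem.Str.isIn "phone" name_lower then "13800138000"
  else if PySem.Str.isIn "token" name_lower then ""
  else "test"

def build_body_template_py (param_names : List String) : List (String × String) :=
  (param_names.foldl (fun (template : PySem.Dict String String) name =>
    template.insert name (pvValA name)) PySem.Dict.empty).items

-- ===== PORT B =====
def pvRules : List (List String × String) :=
  [(["password", "pwd"], "123456"),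
   (["username", "account"], "admin"),
   (["mobile", "phone"], "13800138000"),
   (["token"], "")]

-- does name (lowercased) contain one of the rule's keywords?
def pvMatch (kws : List String) (name : String) : Bool :=
  kws.any (fun kw => PySem.Str.isIn kw (PySem.Str.lower name))

-- one overwrite pass: for name in template: if any keyword hits, template[name] = value
def pvPass (rule : List String × String) (t : PySem.Dict String String) : PySem.Dict String String :=
  t.keys.foldl (fun t name => if pvMatch rule.1 name then t.insert name rule.2 else t) t

def build_body_template_py_alt (param_names : List String) : List (String × String) :=
  let t0 := param_names.foldl (fun (d : PySem.Dict String String) name =>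
    d.insert name "test") PySem.Dict.empty
  (pvRules.reverse.foldl (fun t rule => pvPass rule t) t0).items

-- ===== PRECONDITION & SPEC =====
def Spec_build_body_template_py (param_names : List String) (out : List (String × String)) : Prop := out = build_body_template_py_alt param_names
instance (param_names : List String) (out : List (String × String)) : Decidable (Spec_build_body_template_py param_names out) := by unfold Spec_build_body_template_py; infer_instance

-- ===== CLAIM (what is proved, stated in full; the proofs are below) =====
def Claim_equal_build_body_template_py : Prop := ∀ (param_names : List String), Dom_build_body_template_py param_names → Spec_build_body_template_py param_names (build_body_template_py param_names)

-- ===== LEMMAS AND PROOFS =====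

-- lookup through a fold of inserts whose value depends only on the key
theorem pvGetD_foldl_insert (g : String → String) (l : List String)
    (d : PySem.Dict String String) (k dflt : String) :
    (l.foldl (fun d n => d.insert n (g n)) d).getD k dflt
      = if k ∈ l then g k else d.getD k dflt := by
  induction l generalizing d with
  | nil => simp
  | cons x xs ih =>
    simp only [List.foldl_cons, ih, PySem.Dict.getD_insert, List.mem_cons]
    by_cases hx : k ∈ xs <;> by_cases he : k = x <;> simp [hx, he]

-- one overwrite pass over an arbitrary key list: lookup afterwards
theorem pvPass_getD (kws : List String) (v : String) (ks : List String)
    (d : PySem.Dict String String) (k dflt : String) :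
    (ks.foldl (fun t n => if pvMatch kws n then t.insert n v else t) d).getD k dflt
      = if k ∈ ks ∧ pvMatch kws k then v else d.getD k dflt := by
  induction ks generalizing d with
  | nil => simp
  | cons x xs ih =>
    simp only [List.foldl_cons, List.mem_cons]
    by_cases hm : pvMatch kws x = true
    · simp only [hm, if_true, ih, PySem.Dict.getD_insert]
      by_cases he : k = x
      · subst he
        by_cases hx : k ∈ xs <;> simp [hx, hm]
      · by_cases hx : k ∈ xs <;> by_cases hk : pvMatch kws k = true <;>
          simp [hx, he, hk]
    · simp only [hm, Bool.false_eq_true, if_false, ih]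
      by_cases he : k = x
      · subst he
        have hk : pvMatch kws k = false := by simpa using hm
        by_cases hx : k ∈ xs <;> simp [hx, hk]
      · by_cases hx : k ∈ xs <;> by_cases hk : pvMatch kws k = true <;>
          simp [hx, he, hk]

-- one overwrite pass never changes the key list when all iterated keys are present
theorem pvPass_keys_aux (kws : List String) (v : String) (ks : List String)
    (d : PySem.Dict String String) (h : ∀ n ∈ ks, d.contains n = true) :
    (ks.foldl (fun t n => if pvMatch kws n then t.insert n v else t) d).keys = d.keys := by
  induction ks generalizing d with
  | nil => rfl
  | cons x xs ih =>
    simp only [List.foldl_cons]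
    by_cases hm : pvMatch kws x = true
    · simp only [hm, if_true]
      rw [ih (d.insert x v) (fun n hn => by
        rw [PySem.Dict.contains_insert]
        simp [h n (List.mem_cons_of_mem _ hn)])]
      exact PySem.Dict.keys_insert_of_contains d v (h x (List.mem_cons_self))
    · simp only [hm]
      exact ih d (fun n hn => h n (List.mem_cons_of_mem _ hn))

theorem pvPass_keys (rule : List String × String) (t : PySem.Dict String String) :
    (pvPass rule t).keys = t.keys := by
  unfold pvPass
  exact pvPass_keys_aux rule.1 rule.2 t.keys t
    (fun n hn => (PySem.Dict.contains_iff_mem_keys t n).2 hn)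

theorem pvPass_getD' (rule : List String × String) (t : PySem.Dict String String)
    (k dflt : String) :
    (pvPass rule t).getD k dflt
      = if k ∈ t.keys ∧ pvMatch rule.1 k then rule.2 else t.getD k dflt := by
  unfold pvPass; exact pvPass_getD rule.1 rule.2 t.keys t k dflt

-- ===== VERDICT (by name: the statement is the Claim_ definition above) =====
theorem build_body_template_py_spec : Claim_equal_build_body_template_py := by
  intro names _
  unfold Spec_build_body_template_py build_body_template_py build_body_template_py_alt
  set t0 : PySem.Dict String String :=
    names.foldl (fun d n => d.insert n "test") PySem.Dict.empty with ht0
  set tA : PySem.Dict String String :=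
    names.foldl (fun d n => d.insert n (pvValA n)) PySem.Dict.empty with htA
  have hkeys0 : t0.keys = PySem.Set.update PySem.Dict.empty.keys names :=
    PySem.Dict.keys_foldl_insert names _ _
  have hkeysA : tA.keys = PySem.Set.update PySem.Dict.empty.keys names :=
    PySem.Dict.keys_foldl_insert names _ _
  have hnd0 : t0.keys.Nodup := PySem.Dict.nodup_keys_foldl_insert names _ _ (by simp)
  have hndA : tA.keys.Nodup := PySem.Dict.nodup_keys_foldl_insert names _ _ (by simp)
  -- unfold B's four passes
  have hRev : pvRules.reverse.foldl (fun t rule => pvPass rule t) t0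
      = pvPass (["password","pwd"], "123456")
          (pvPass (["username","account"], "admin")
            (pvPass (["mobile","phone"], "13800138000")
              (pvPass (["token"], "") t0))) := by
    simp [pvRules, List.foldl]
  have hkB : (pvRules.reverse.foldl (fun t rule => pvPass rule t) t0).keys = t0.keys := by
    rw [hRev, pvPass_keys, pvPass_keys, pvPass_keys, pvPass_keys]
  have hmemK : ∀ k, k ∈ t0.keys ↔ k ∈ names := by
    intro k
    rw [hkeys0]
    simp [PySem.Set.mem_update, PySem.Dict.keys_empty]
  -- pointwise values
  have hgA : ∀ k ∈ t0.keys, tA.getD k "test" = pvValA k := by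
    intro k hk
    rw [htA, pvGetD_foldl_insert]
    simp [(hmemK k).1 hk]
  have hgB : ∀ k ∈ t0.keys,
      (pvRules.reverse.foldl (fun t rule => pvPass rule t) t0).getD k "test" = pvValA k := by
    intro k hk
    have hg0 : t0.getD k "test" = "test" := by
      rw [ht0, pvGetD_foldl_insert]; split <;> simp [PySem.Dict.getD_empty]
    rw [hRev, pvPass_getD', pvPass_getD', pvPass_getD', pvPass_getD']
    rw [pvPass_keys, pvPass_keys, pvPass_keys]
    simp only [hk, true_and, hg0]
    unfold pvValA pvMatch
    simp only [List.any_cons, List.any_nil, Bool.or_false]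
  -- items via the key lists
  have hiA : tA.items = tA.keys.map (fun k => (k, tA.getD k "test")) :=
    PySem.Dict.items_eq_map_keys tA hndA "test"
  have hiB : (pvRules.reverse.foldl (fun t rule => pvPass rule t) t0).items
      = (pvRules.reverse.foldl (fun t rule => pvPass rule t) t0).keys.map
          (fun k => (k, (pvRules.reverse.foldl (fun t rule => pvPass rule t) t0).getD k "test")) :=
    PySem.Dict.items_eq_map_keys _ (hkB ▸ hnd0) "test"
  rw [hiA, hiB, hkB, hkeysA, ← hkeys0]
  exact List.map_congr_left (fun k hk => by rw [hgA k hk, hgB k hk])
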